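-- pv_equiv track=rewrite | github.com/zhou-1314/OmicsClaw | omicsclaw/interactive/_omicsclaw_actions.py | _resolve_domain_filter
-- ===== SOURCE A (Python) =====
-- from typing import Any
--
-- def _resolve_domain_filter(
--     domains: dict[str, dict[str, Any]],
--     domain_filter: str | None,
-- ) -> str | None:
--     if not domain_filter:
--         return None
--
--     raw = domain_filter.strip()
--     if not raw:
--         return None
--
--     lowered = raw.lower()
--     for key, info in domains.items():
--         if lowered == key.lower():
--             return key
--         name = str(info.get("name", "")).strip().lower()
--         if name and lowered == name:
--             return key
--
--     partial_matches = [
--         key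
--         for key, info in domains.items()
--         if lowered in key.lower() or lowered in str(info.get("name", "")).lower()
--     ]
--     if len(partial_matches) == 1:
--         return partial_matches[0]
--     return raw
-- ===== SOURCE B (Python) =====
-- def _resolve_domain_filter(domains, domain_filter):
--     if not domain_filter:
--         return None
--     raw = domain_filter.strip()
--     if not raw:
--         return None
--     lowered = raw.lower()
--     exact_matches = []
--     partial_matches = []
--     for key, info in domains.items():
--         key_l = key.lower()
--         name_raw = str(info.get("name", ""))
--         name = name_raw.strip().lower()
--         if lowered == key_l or (name and lowered == name):
--             exact_matches.append(key)
--         if lowered in key_l or lowered in name_raw.lower():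
--             partial_matches.append(key)
--     if exact_matches:
--         return exact_matches[0]
--     if len(partial_matches) == 1:
--         return partial_matches[0]
--     return raw
-- ===== Notes on version B (the rewrite author's own statement) =====
-- stated objective: alternative
-- what changed: A's two separate passes (an early-return exact-match loop and a second partial-match comprehension) are fused into one pass that accumulates exact and partial matches simultaneously, with the decision made once after the loop.
import Mathlib
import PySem

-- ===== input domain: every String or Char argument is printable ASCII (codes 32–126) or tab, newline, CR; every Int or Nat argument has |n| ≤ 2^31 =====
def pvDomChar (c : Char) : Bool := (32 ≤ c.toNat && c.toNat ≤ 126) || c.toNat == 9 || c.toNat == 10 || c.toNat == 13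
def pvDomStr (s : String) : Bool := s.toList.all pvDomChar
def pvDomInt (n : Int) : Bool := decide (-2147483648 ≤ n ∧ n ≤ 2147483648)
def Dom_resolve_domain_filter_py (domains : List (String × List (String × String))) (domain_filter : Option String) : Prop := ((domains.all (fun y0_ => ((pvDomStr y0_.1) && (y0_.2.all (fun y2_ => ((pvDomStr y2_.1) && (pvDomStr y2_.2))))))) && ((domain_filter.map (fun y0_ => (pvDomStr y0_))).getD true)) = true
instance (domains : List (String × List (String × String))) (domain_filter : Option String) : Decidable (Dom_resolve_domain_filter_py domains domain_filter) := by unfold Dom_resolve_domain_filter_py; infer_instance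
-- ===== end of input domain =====

-- B fuses A's two passes (exact-match early-return loop + partial-match comprehension) into one pass collecting both lists; same return value.


-- ===== PORT A =====
-- info.get("name", "") on the inner dict (assoc list, first match)
def pvNameOf (info : List (String × String)) : String :=
  PySem.Dict.getD (PySem.Dict.mk info) "name" ""

-- the partial-match condition, written identically in both Pythons
def pvPartP (lowered : String) (kv : String × List (String × String)) : Bool :=
  PySem.Str.isIn lowered (PySem.Str.lower kv.1) ||
  PySem.Str.isIn lowered (PySem.Str.lower (pvNameOf kv.2))

-- A's first loop: return the first key whose lowered key, or nonempty stripped lowered name, equals `lowered`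
def pvExactLoop (lowered : String) : List (String × List (String × String)) → Option String
  | [] => none
  | (key, info) :: rest =>
    if lowered = PySem.Str.lower key then some key
    else
      let name := PySem.Str.lower (PySem.Str.strip (pvNameOf info))
      if name ≠ "" ∧ lowered = name then some key
      else pvExactLoop lowered rest

def resolve_domain_filter_py (domains : List (String × List (String × String))) (domain_filter : Option String) : Option String :=
  match domain_filter with
  | none => none
  | some df =>
    if df = "" then none
    else
      let raw := PySem.Str.strip df
      if raw = "" then none
      else
        let lowered := PySem.Str.lower raw
        match pvExactLoop lowered domains with
        | some key => some key
        | none =>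
          let partial_matches := (domains.filter (pvPartP lowered)).map (·.1)
          if partial_matches.length = 1 then some (partial_matches.headD raw)
          else some raw

-- ===== PORT B =====
-- B: one pass collecting exact and partial matches together, decision after the loop
def pvExactP (lowered : String) (kv : String × List (String × String)) : Bool :=
  let name := PySem.Str.lower (PySem.Str.strip (pvNameOf kv.2))
  lowered == PySem.Str.lower kv.1 || (name != "" && lowered == name)

def pvStep (lowered : String) (acc : List String × List String)
    (kv : String × List (String × String)) : List String × List String :=
  (if pvExactP lowered kv then acc.1 ++ [kv.1] else acc.1,
   if pvPartP lowered kv then acc.2 ++ [kv.1] else acc.2)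

def resolve_domain_filter_py_alt (domains : List (String × List (String × String))) (domain_filter : Option String) : Option String :=
  match domain_filter with
  | none => none
  | some df =>
    if df = "" then none
    else
      let raw := PySem.Str.strip df
      if raw = "" then none
      else
        let lowered := PySem.Str.lower raw
        let acc := domains.foldl (pvStep lowered) ([], [])
        match acc.1 with
        | k :: _ => some k
        | [] =>
          match acc.2 with
          | [k] => some k
          | _ => some raw

-- ===== PRECONDITION & SPEC =====
def Spec_resolve_domain_filter_py (domains : List (String × List (String × String))) (domain_filter : Option String) (out : Option String) : Prop := out = resolve_domain_filter_py_alt domains domain_filter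
instance (domains : List (String × List (String × String))) (domain_filter : Option String) (out : Option String) : Decidable (Spec_resolve_domain_filter_py domains domain_filter out) := by unfold Spec_resolve_domain_filter_py; infer_instance

-- ===== CLAIM (what is proved, stated in full; the proofs are below) =====
def Claim_equal_resolve_domain_filter_py : Prop := ∀ (domains : List (String × List (String × String))) (domain_filter : Option String), Dom_resolve_domain_filter_py domains domain_filter → Spec_resolve_domain_filter_py domains domain_filter (resolve_domain_filter_py domains domain_filter)

-- ===== LEMMAS AND PROOFS =====

-- the fold accumulates exactly the filtered keys, in order
theorem pvStep_foldl (lowered : String) (ds : List (String × List (String × String)))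
    (acc : List String × List String) :
    ds.foldl (pvStep lowered) acc =
      (acc.1 ++ (ds.filter (pvExactP lowered)).map (·.1),
       acc.2 ++ (ds.filter (pvPartP lowered)).map (·.1)) := by
  induction ds generalizing acc with
  | nil => simp
  | cons kv rest ih =>
    simp only [List.foldl_cons, ih, List.filter_cons]
    by_cases h1 : pvExactP lowered kv <;> by_cases h2 : pvPartP lowered kv <;>
      simp [pvStep, h1, h2]

-- A's early-return loop is the head of the exact-filtered key list
theorem pvExactLoop_eq (lowered : String) (ds : List (String × List (String × String))) :
    pvExactLoop lowered ds = ((ds.filter (pvExactP lowered)).map (·.1)).head? := by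
  induction ds with
  | nil => simp [pvExactLoop]
  | cons kv rest ih =>
    obtain ⟨key, info⟩ := kv
    by_cases hk : lowered = PySem.Str.lower key
    · simp [pvExactLoop, hk, pvExactP]
    · by_cases hn : PySem.Str.lower (PySem.Str.strip (pvNameOf info)) ≠ "" ∧
          lowered = PySem.Str.lower (PySem.Str.strip (pvNameOf info))
      · simp [pvExactLoop, hk, hn, pvExactP]
      · have hp : pvExactP lowered (key, info) = false := by
          simp only [pvExactP]
          push Not at hn
          by_cases hne : PySem.Str.lower (PySem.Str.strip (pvNameOf info)) = ""
          · simp [hk, hne]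
          · simp [hk, hne, hn hne]
        simp only [pvExactLoop, if_neg hk, if_neg hn, ih, List.filter_cons, hp]
        simp

-- ===== VERDICT (by name: the statement is the Claim_ definition above) =====
theorem resolve_domain_filter_py_spec : Claim_equal_resolve_domain_filter_py := by
  intro domains domain_filter _
  unfold Spec_resolve_domain_filter_py resolve_domain_filter_py resolve_domain_filter_py_alt
  match domain_filter with
  | none => rfl
  | some df =>
    by_cases h1 : df = ""
    · simp [h1]
    · simp only [if_neg h1]
      by_cases h2 : PySem.Str.strip df = ""
      · simp [h2]
      · simp only [if_neg h2, pvStep_foldl, pvExactLoop_eq, List.nil_append]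
        cases hE : (List.map (fun x => x.1) (List.filter (pvExactP (PySem.Str.lower (PySem.Str.strip df))) domains)) with
        | cons k rest => simp
        | nil =>
          simp only [List.head?_nil]
          cases hP : (List.map (fun x => x.1) (List.filter (pvPartP (PySem.Str.lower (PySem.Str.strip df))) domains)) with
          | nil => simp
          | cons k rest =>
            cases rest <;> simp
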